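-- pv_equiv track=rewrite | github.com/betmma/VideoWorldModelTest | games/wolfensteinMaze.py | _path_shape
-- ===== SOURCE A (Python) =====
-- def _path_shape(path: list[tuple[int, int]]) -> tuple[int, int]:
--     """Return how many turns and how long the longest straight run are for one path."""
--     turn_count = 0
--     longest_run = 0
--     current_run = 0
--     previous_direction = None
--     for index in range(1, len(path)):
--         direction = (path[index][0] - path[index - 1][0], path[index][1] - path[index - 1][1])
--         if direction == previous_direction:
--             current_run += 1
--         else:
--             if previous_direction is not None:
--                 turn_count += 1
--             previous_direction = direction
--             current_run = 1
--         if current_run > longest_run: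
--             longest_run = current_run
--     return turn_count, longest_run
-- ===== SOURCE B (Python) =====
-- def _path_shape(path: list[tuple[int, int]]) -> tuple[int, int]:
--     """Return how many turns and how long the longest straight run are for one path."""
--     dirs = [(path[i][0] - path[i - 1][0], path[i][1] - path[i - 1][1])
--             for i in range(1, len(path))]
--     lengths = _run_lengths(dirs)
--     return max(len(lengths) - 1, 0), max(lengths, default=0)
--
--
-- def _run_lengths(ds):
--     """Lengths of the maximal runs of equal consecutive elements of ds."""
--     lengths = []
--     i = 0
--     while i < len(ds):
--         j = i + 1
--         while j < len(ds) and ds[j] == ds[i]: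
--             j += 1
--         lengths.append(j - i)
--         i = j
--     return lengths
-- ===== Notes on version B (the rewrite author's own statement) =====
-- stated objective: idiomatic
-- what changed: Replaces A's incremental four-variable state machine with a two-phase computation: build the direction-delta list, group it into maximal-run lengths, then read off turns = runs-1 (clamped to 0) and longest = max run length (default 0).
import Mathlib
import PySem

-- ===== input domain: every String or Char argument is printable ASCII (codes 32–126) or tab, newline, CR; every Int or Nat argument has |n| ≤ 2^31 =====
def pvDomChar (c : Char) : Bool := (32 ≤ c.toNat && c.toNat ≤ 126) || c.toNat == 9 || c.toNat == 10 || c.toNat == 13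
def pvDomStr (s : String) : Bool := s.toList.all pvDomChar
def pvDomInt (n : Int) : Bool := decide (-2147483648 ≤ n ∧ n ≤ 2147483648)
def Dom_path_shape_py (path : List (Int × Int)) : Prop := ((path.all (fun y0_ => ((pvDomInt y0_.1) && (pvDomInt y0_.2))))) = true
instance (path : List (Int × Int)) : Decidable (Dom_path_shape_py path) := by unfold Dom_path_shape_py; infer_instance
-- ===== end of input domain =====

-- B replaces A's incremental state machine by a build-then-group decomposition (delta list, run lengths, closed-form read-off); same cost, same return value.

-- ===== PORT A =====
-- literal transliteration of A's single loop over indices 1..len(path)-1 with state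
-- (turn_count, longest_run, current_run, previous_direction)
def path_shape_py (path : List (Int × Int)) : Int × Int :=
  let st := (PySem.List.pyRange 1 (path.length : Int) 1).foldl
    (fun (st : Int × Int × Int × Option (Int × Int)) index =>
      let direction := ((PySem.List.pyGetD path index (0, 0)).1 - (PySem.List.pyGetD path (index - 1) (0, 0)).1,
                        (PySem.List.pyGetD path index (0, 0)).2 - (PySem.List.pyGetD path (index - 1) (0, 0)).2)
      let st1 := if some direction = st.2.2.2
        then (st.1, st.2.1, st.2.2.1 + 1, st.2.2.2)
        else ((if st.2.2.2.isSome then st.1 + 1 else st.1), st.2.1, (1 : Int), some direction)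
      (st1.1, if st1.2.2.1 > st1.2.1 then st1.2.2.1 else st1.2.1, st1.2.2.1, st1.2.2.2))
    ((0 : Int), (0 : Int), (0 : Int), (none : Option (Int × Int)))
  (st.1, st.2.1)

-- ===== PORT B =====
-- inner while loop of _run_lengths: number of leading elements of ds equal to d
def pvCountLead (d : Int × Int) : List (Int × Int) → Nat
  | [] => 0
  | e :: rest => if e = d then pvCountLead d rest + 1 else 0

-- outer while loop of _run_lengths: consume one maximal run, emit its length, continue
def pvRunLengths : List (Int × Int) → List Int
  | [] => []
  | d :: rest =>
      ((pvCountLead d rest : Int) + 1) :: pvRunLengths (rest.drop (pvCountLead d rest))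
  termination_by ds => ds.length
  decreasing_by simp

def path_shape_py_alt (path : List (Int × Int)) : Int × Int :=
  let dirs := (PySem.List.pyRange 1 (path.length : Int) 1).map
    (fun index => ((PySem.List.pyGetD path index (0, 0)).1 - (PySem.List.pyGetD path (index - 1) (0, 0)).1,
                   (PySem.List.pyGetD path index (0, 0)).2 - (PySem.List.pyGetD path (index - 1) (0, 0)).2))
  let lengths := pvRunLengths dirs
  (max ((lengths.length : Int) - 1) 0, (PySem.List.max? lengths (fun y => y)).getD 0)

-- ===== PRECONDITION & SPEC =====
def Spec_path_shape_py (path : List (Int × Int)) (out : Int × Int) : Prop := out = path_shape_py_alt path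
instance (path : List (Int × Int)) (out : Int × Int) : Decidable (Spec_path_shape_py path out) := by unfold Spec_path_shape_py; infer_instance

-- ===== CLAIM (what is proved, stated in full; the proofs are below) =====
def Claim_equal_path_shape_py : Prop := ∀ (path : List (Int × Int)), Dom_path_shape_py path → Spec_path_shape_py path (path_shape_py path)

-- ===== LEMMAS AND PROOFS =====


lemma pvRunLengths_nil : pvRunLengths [] = [] := by rw [pvRunLengths]

lemma pvRunLengths_cons (d : Int × Int) (rest : List (Int × Int)) :
    pvRunLengths (d :: rest)
      = ((pvCountLead d rest : Int) + 1) :: pvRunLengths (rest.drop (pvCountLead d rest)) := by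
  rw [pvRunLengths]

def pvMx (ls : List Int) : Int := (PySem.List.max? ls (fun y => y)).getD 0

lemma pvMx_nil : pvMx [] = 0 := rfl

lemma pvFoldlMax (t : List Int) : ∀ (a b : Int), t.foldl max (max a b) = max a (t.foldl max b) := by
  induction t with
  | nil => intro a b; rfl
  | cons x t ih =>
      intro a b
      simp only [List.foldl_cons, max_assoc, ih]

lemma pvMx_cons (a : Int) (ls : List Int) (ha : 0 ≤ a) : pvMx (a :: ls) = max a (pvMx ls) := by
  cases ls with
  | nil =>
      simp [pvMx, PySem.List.max?]
      omega
  | cons c t =>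
      simp only [pvMx, PySem.List.max?_id_cons, Option.getD_some, List.foldl_cons]
      exact pvFoldlMax t a c

def pvStepD (st : Int × Int × Int × Option (Int × Int)) (direction : Int × Int) :
    Int × Int × Int × Option (Int × Int) :=
  let st1 := if some direction = st.2.2.2
    then (st.1, st.2.1, st.2.2.1 + 1, st.2.2.2)
    else ((if st.2.2.2.isSome then st.1 + 1 else st.1), st.2.1, (1 : Int), some direction)
  (st1.1, if st1.2.2.1 > st1.2.1 then st1.2.2.1 else st1.2.1, st1.2.2.1, st1.2.2.2)

lemma pvStepD_same (t l c : Int) (d : Int × Int) :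
    pvStepD (t, l, c, some d) d = (t, max l (c + 1), c + 1, some d) := by
  simp [pvStepD]
  split <;> omega

lemma pvStepD_new (t l c : Int) (d d' : Int × Int) (h : d' ≠ d) :
    pvStepD (t, l, c, some d) d' = (t + 1, max l 1, 1, some d') := by
  simp [pvStepD, h]
  split <;> omega

lemma pvStepD_init (d : Int × Int) :
    pvStepD (0, 0, 0, none) d = (0, 1, 1, some d) := by
  simp [pvStepD]

lemma pvCountLead_drop_head (d : Int × Int) :
    ∀ (ds : List (Int × Int)) (e : Int × Int) (rest : List (Int × Int)),
      ds.drop (pvCountLead d ds) = e :: rest → e ≠ d := by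
  intro ds
  induction ds with
  | nil => intro e rest h; simp [pvCountLead] at h
  | cons x tail ih =>
      intro e rest h
      by_cases hx : x = d
      · simp [pvCountLead, hx] at h
        exact ih e rest h
      · simp [pvCountLead, hx] at h
        rw [← h.1]; exact hx

lemma pvFold_run (d : Int × Int) :
    ∀ (ds : List (Int × Int)) (t l c : Int), c ≤ l →
      ds.foldl pvStepD (t, l, c, some d)
        = (ds.drop (pvCountLead d ds)).foldl pvStepD
            (t, max l (c + (pvCountLead d ds : Int)), c + (pvCountLead d ds : Int), some d) := by
  intro ds
  induction ds with
  | nil =>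
      intro t l c hcl
      simp only [pvCountLead, List.foldl_nil, Nat.cast_zero, add_zero, List.drop_nil]
      rw [max_eq_left hcl]
  | cons e tail ih =>
      intro t l c hcl
      by_cases he : e = d
      · subst he
        have hk : pvCountLead e (e :: tail) = pvCountLead e tail + 1 := by
          simp [pvCountLead]
        rw [List.foldl_cons, pvStepD_same, ih t (max l (c + 1)) (c + 1) (le_max_right _ _), hk,
          List.drop_succ_cons]
        push_cast
        have hsum : c + 1 + (pvCountLead e tail : Int) = c + ((pvCountLead e tail : Int) + 1) := by
          ring
        have hmax : max (max l (c + 1)) (c + 1 + (pvCountLead e tail : Int))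
            = max l (c + ((pvCountLead e tail : Int) + 1)) := by
          simp only [max_def]
          split_ifs <;> omega
        rw [hmax, hsum]
      · simp only [pvCountLead, if_neg he, Nat.cast_zero, add_zero, List.drop_zero]
        rw [max_eq_left hcl]

lemma pvFold_out :
    ∀ (n : Nat) (ds : List (Int × Int)), ds.length ≤ n → ∀ (t l c : Int) (d : Int × Int),
      1 ≤ c → c ≤ l →
      (ds.foldl pvStepD (t, l, c, some d)).1
          = t + ((pvRunLengths (ds.drop (pvCountLead d ds))).length : Int)
        ∧ (ds.foldl pvStepD (t, l, c, some d)).2.1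
          = max (max l (c + (pvCountLead d ds : Int)))
              (pvMx (pvRunLengths (ds.drop (pvCountLead d ds)))) := by
  intro n
  induction n with
  | zero =>
      intro ds hlen t l c d hc hcl
      have : ds = [] := List.eq_nil_of_length_eq_zero (by omega)
      subst this
      simp [pvCountLead, pvRunLengths_nil, pvMx_nil]
      omega
  | succ n ih =>
      intro ds hlen t l c d hc hcl
      rw [pvFold_run d ds t l c hcl]
      cases hd : ds.drop (pvCountLead d ds) with
      | nil =>
          simp [pvRunLengths_nil, pvMx_nil]
          omega
      | cons d' rest =>
          have hne : d' ≠ d := pvCountLead_drop_head d ds d' rest hd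
          have hlen' : rest.length ≤ n := by
            have := congrArg List.length hd
            simp at this
            omega
          rw [List.foldl_cons, pvStepD_new _ _ _ _ _ hne]
          obtain ⟨ih1, ih2⟩ := ih rest hlen' (t + 1) (max (max l (c + (pvCountLead d ds : Int))) 1) 1 d' le_rfl (le_max_right _ _)
          rw [ih1, ih2, pvRunLengths_cons, pvMx_cons _ _ (by positivity)]
          constructor
          · simp; omega
          · omega

-- the shared direction-delta list (proof-side abbreviation)
def pvDirs (path : List (Int × Int)) : List (Int × Int) :=
  (PySem.List.pyRange 1 (path.length : Int) 1).map
    (fun index => ((PySem.List.pyGetD path index (0, 0)).1 - (PySem.List.pyGetD path (index - 1) (0, 0)).1,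
                   (PySem.List.pyGetD path index (0, 0)).2 - (PySem.List.pyGetD path (index - 1) (0, 0)).2))

lemma pvA_eq (path : List (Int × Int)) :
    path_shape_py path =
      (((pvDirs path).foldl pvStepD (0, 0, 0, none)).1,
       ((pvDirs path).foldl pvStepD (0, 0, 0, none)).2.1) := by
  unfold path_shape_py pvDirs pvStepD
  rw [List.foldl_map]

lemma pvAlt_eq (path : List (Int × Int)) :
    path_shape_py_alt path =
      (max (((pvRunLengths (pvDirs path)).length : Int) - 1) 0,
       pvMx (pvRunLengths (pvDirs path))) := rfl

-- ===== VERDICT (by name: the statement is the Claim_ definition above) =====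
theorem path_shape_py_spec : Claim_equal_path_shape_py := by
  intro path _
  unfold Spec_path_shape_py
  rw [pvA_eq, pvAlt_eq]
  cases hds : pvDirs path with
  | nil => simp [pvRunLengths_nil, pvMx_nil]
  | cons d rest =>
      rw [List.foldl_cons, pvStepD_init]
      obtain ⟨h1, h2⟩ := pvFold_out rest.length rest le_rfl 0 1 1 d le_rfl le_rfl
      rw [h1, h2, pvRunLengths_cons, pvMx_cons _ _ (by positivity), Prod.mk.injEq]
      constructor
      · simp only [List.length_cons, max_def]
        push_cast
        split_ifs <;> omega
      · simp only [max_def]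
        split_ifs <;> omega
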